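-- pv_equiv track=rewrite | github.com/callewallerstedt/Operator | textract_test_image.py | _normalize_exact
-- ===== SOURCE A (Python) =====
-- SWEDISH = "\u00e5\u00e4\u00f6"
--
-- def _normalize_exact(text: str) -> str:
--     if not text:
--         return ""
--     t = text.lower()
--     out = []
--     for ch in t:
--         if ch.isalpha() or ch in SWEDISH or ch.isspace():
--             out.append(ch)
--     return " ".join("".join(out).split())
-- ===== SOURCE B (Python) =====
-- SWEDISH = "\u00e5\u00e4\u00f6"
--
-- def _normalize_exact(text: str) -> str:
--     if not text:
--         return ""
--     words = []
--     buf = []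
--     for ch in text.lower():
--         if ch.isalpha() or ch in SWEDISH:
--             buf.append(ch)
--         elif ch.isspace():
--             if buf:
--                 words.append("".join(buf))
--             buf = []
--     if buf:
--         words.append("".join(buf))
--     return " ".join(words)
-- ===== Notes on version B (the rewrite author's own statement) =====
-- stated objective: alternative
-- what changed: Replaced filter-then-join-then-split-then-join with a single-pass tokenizer that maintains a current-word buffer and flushes it on whitespace, collapsing whitespace in the same pass.
import Mathlib
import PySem

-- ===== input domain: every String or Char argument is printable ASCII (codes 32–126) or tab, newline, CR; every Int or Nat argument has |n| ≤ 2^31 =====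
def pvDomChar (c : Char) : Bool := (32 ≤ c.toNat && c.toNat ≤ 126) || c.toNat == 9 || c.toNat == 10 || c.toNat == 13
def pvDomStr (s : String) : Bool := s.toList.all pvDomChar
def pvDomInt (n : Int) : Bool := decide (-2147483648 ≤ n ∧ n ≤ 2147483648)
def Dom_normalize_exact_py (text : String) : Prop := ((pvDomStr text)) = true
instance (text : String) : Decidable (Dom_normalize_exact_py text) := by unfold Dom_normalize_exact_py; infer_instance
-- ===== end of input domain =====

-- B is an alternative, single-pass tokenizer (buffer + flush on whitespace) instead of
-- A's filter → join → split → join pipeline; same cost, different decomposition.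

-- ===== PORT A =====
-- SWEDISH = "åäö"
def pvSwedishA : List Char := ['\u00e5', '\u00e4', '\u00f6']

def normalize_exact_py (text : String) : String :=
  if text == "" then ""
  else
    let t := PySem.Chars.lower text.toList
    let out := t.foldl (fun acc ch =>
      if PySem.Chars.isalpha ch || PySem.Chars.isIn [ch] pvSwedishA || PySem.Chars.isspace ch
      then acc ++ [ch] else acc) []
    String.ofList (PySem.Chars.join [' '] (PySem.Chars.split₀ out))

-- ===== PORT B =====
def pvSwedishB : List Char := ['\u00e5', '\u00e4', '\u00f6']

-- one tokenizer step over state (words, buf)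
def pvStepB (st : List (List Char) × List Char) (ch : Char) : List (List Char) × List Char :=
  if PySem.Chars.isalpha ch || PySem.Chars.isIn [ch] pvSwedishB then (st.1, st.2 ++ [ch])
  else if PySem.Chars.isspace ch then
    (if st.2.isEmpty then st.1 else st.1 ++ [st.2], [])
  else st

def normalize_exact_py_alt (text : String) : String :=
  if text == "" then ""
  else
    let st := (PySem.Chars.lower text.toList).foldl pvStepB ([], [])
    let words := if st.2.isEmpty then st.1 else st.1 ++ [st.2]
    String.ofList (PySem.Chars.join [' '] words)

-- ===== PRECONDITION & SPEC =====
def Spec_normalize_exact_py (text : String) (out : String) : Prop := out = normalize_exact_py_alt text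
instance (text : String) (out : String) : Decidable (Spec_normalize_exact_py text out) := by unfold Spec_normalize_exact_py; infer_instance

-- ===== CLAIM (what is proved, stated in full; the proofs are below) =====
def Claim_equal_normalize_exact_py : Prop := ∀ (text : String), Dom_normalize_exact_py text → Spec_normalize_exact_py text (normalize_exact_py text)

-- ===== LEMMAS AND PROOFS =====

def pvKeep (c : Char) : Bool := PySem.Chars.isalpha c || PySem.Chars.isIn [c] pvSwedishA

def pvPred (c : Char) : Bool := pvKeep c || PySem.Chars.isspace c

theorem pvSpace_not_keep (c : Char) (h : PySem.Chars.isspace c = true) : pvKeep c = false := by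
  unfold pvKeep
  simp only [PySem.Chars.isspace, Bool.or_eq_true, Bool.and_eq_true, decide_eq_true_eq] at h
  have halpha : PySem.Chars.isalpha c = false := by
    simp only [PySem.Chars.isalpha, PySem.Chars.isupper, PySem.Chars.islower, Char.le_def,
      UInt32.le_iff_toNat_le, Bool.or_eq_false_iff, Bool.and_eq_false_iff,
      decide_eq_false_iff_not, not_le]
    have h1 : ('A').val.toNat = 65 := rfl
    have h2 : ('Z').val.toNat = 90 := rfl
    have h3 : ('a').val.toNat = 97 := rfl
    have h4 : ('z').val.toNat = 122 := rfl
    have h5 : c.toNat = c.val.toNat := rfl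
    omega
  have hsw : PySem.Chars.isIn [c] pvSwedishA = false := by
    by_contra hne
    have htrue : PySem.Chars.isIn [c] pvSwedishA = true := by
      cases hb : PySem.Chars.isIn [c] pvSwedishA
      · exact absurd hb hne
      · rfl
    have hinf := (PySem.Chars.isIn_iff_infix _ _).mp htrue
    have hmem : c ∈ pvSwedishA := List.singleton_sublist.mp hinf.sublist
    have h5 : c.toNat = c.val.toNat := rfl
    unfold pvSwedishA at hmem
    simp only [List.mem_cons, List.not_mem_nil, or_false] at hmem
    rcases hmem with rfl | rfl | rfl <;> exact absurd h (by decide)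
  simp [halpha, hsw]

-- chars failing pvPred are ignored by the tokenizer
theorem pvFoldl_filter (cs : List Char) (st : List (List Char) × List Char) :
    cs.foldl pvStepB st = (cs.filter pvPred).foldl pvStepB st := by
  induction cs generalizing st with
  | nil => rfl
  | cons c rest ih =>
    by_cases hp : pvPred c = true
    · simp [hp, List.foldl_cons, ih]
    · have hp' : pvPred c = false := by
        cases hb : pvPred c
        · rfl
        · exact absurd hb hp
      have hk : pvKeep c = false := by
        unfold pvPred at hp'
        exact (Bool.or_eq_false_iff.mp hp').1
      have hs : PySem.Chars.isspace c = false := by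
        unfold pvPred at hp'
        exact (Bool.or_eq_false_iff.mp hp').2
      have hk2 := Bool.or_eq_false_iff.mp (by unfold pvKeep at hk; exact hk)
      have hstep : pvStepB st c = st := by
        unfold pvStepB
        rw [show pvSwedishB = pvSwedishA from rfl]
        simp [hk2.1, hk2.2, hs]
      simp [hp', List.foldl_cons, hstep, ih]

-- the tokenizer over an all-pvPred list computes exactly split₀
theorem pvGo_rel (cs : List Char) (ws : List (List Char)) (buf : List Char)
    (h : ∀ c ∈ cs, pvPred c = true) :
    PySem.Chars.split₀.go cs buf.reverse ws.reverse =
      (let st := cs.foldl pvStepB (ws, buf);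
       if st.2.isEmpty then st.1 else st.1 ++ [st.2]) := by
  induction cs generalizing ws buf with
  | nil =>
    simp only [PySem.Chars.split₀.go, List.foldl_nil]
    by_cases hb : buf.isEmpty
    · simp [List.isEmpty_iff.mp hb]
    · have : buf.reverse.isEmpty = false := by
        simp [List.isEmpty_iff] at *
        exact hb
      simp [List.isEmpty_iff] at hb
      simp [this, hb]
  | cons c rest ih =>
    have hc := h c (List.mem_cons_self)
    have hrest : ∀ x ∈ rest, pvPred x = true := fun x hx => h x (List.mem_cons_of_mem _ hx)
    by_cases hs : PySem.Chars.isspace c = true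
    · have hk := pvSpace_not_keep c hs
      have hk2 := Bool.or_eq_false_iff.mp (by unfold pvKeep at hk; exact hk)
      have hstep : pvStepB (ws, buf) c =
          ((if buf.isEmpty then ws else ws ++ [buf]), []) := by
        unfold pvStepB
        rw [show pvSwedishB = pvSwedishA from rfl]
        simp [hk2.1, hk2.2, hs]
      by_cases hb : buf.isEmpty
      · have hb' : buf = [] := List.isEmpty_iff.mp hb
        have := ih ws [] hrest
        subst hb'
        simp only [PySem.Chars.split₀.go, hs, List.reverse_nil, List.isEmpty_nil, if_true]
        rw [List.foldl_cons, hstep]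
        simpa using this
      · have hb' : buf ≠ [] := by simpa [List.isEmpty_iff] using hb
        have := ih (ws ++ [buf]) [] hrest
        have hne : buf.reverse.isEmpty = false := by
          simp [hb']
        simp only [PySem.Chars.split₀.go, hs, hne, if_true]
        rw [show (buf.reverse.reverse :: ws.reverse) = (ws ++ [buf]).reverse by simp]
        rw [List.foldl_cons, hstep, if_neg (by simp [hb'] : ¬ buf.isEmpty = true)]
        simpa using this
    · have hk : pvKeep c = true := by
        unfold pvPred at hc
        rcases Bool.or_eq_true_iff.mp hc with h1 | h1
        · exact h1
        · exact absurd h1 hs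
      have hstep : pvStepB (ws, buf) c = (ws, buf ++ [c]) := by
        unfold pvStepB
        rw [show pvSwedishB = pvSwedishA from rfl]
        rcases Bool.or_eq_true_iff.mp (by unfold pvKeep at hk; exact hk) with h1 | h1 <;> simp [h1]
      have hs' : PySem.Chars.isspace c = false := by
        cases hb : PySem.Chars.isspace c
        · rfl
        · exact absurd hb hs
      have := ih ws (buf ++ [c]) hrest
      simp only [PySem.Chars.split₀.go, hs', Bool.false_eq_true, if_false]
      rw [show (c :: buf.reverse) = (buf ++ [c]).reverse by simp]
      simpa [List.foldl_cons, hstep] using this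

-- ===== VERDICT (by name: the statement is the Claim_ definition above) =====
theorem normalize_exact_py_spec : Claim_equal_normalize_exact_py := by
  intro text _
  unfold Spec_normalize_exact_py normalize_exact_py normalize_exact_py_alt
  by_cases he : text == ""
  · simp [he]
  · simp only [he, Bool.false_eq_true, if_false]
    set t := PySem.Chars.lower text.toList with ht
    have hfilter : t.foldl (fun acc ch =>
        if PySem.Chars.isalpha ch || PySem.Chars.isIn [ch] pvSwedishA || PySem.Chars.isspace ch
        then acc ++ [ch] else acc) [] = t.filter pvPred := by
      have := PySem.List.foldl_append_if_eq_filter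
        (p := fun ch => PySem.Chars.isalpha ch || PySem.Chars.isIn [ch] pvSwedishA || PySem.Chars.isspace ch)
        (l := t) (acc := [])
      rw [this]
      simp only [List.nil_append]
      apply List.filter_congr
      intro c _
      unfold pvPred pvKeep
      simp [Bool.or_assoc]
    have hall : ∀ c ∈ t.filter pvPred, pvPred c = true := fun c hc => List.of_mem_filter hc
    have hfold : (t.filter pvPred).foldl pvStepB ([], []) = t.foldl pvStepB ([], []) :=
      (pvFoldl_filter t ([], [])).symm
    have hgo := pvGo_rel (t.filter pvPred) [] [] hall
    simp only [List.reverse_nil] at hgo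
    have hsplit : PySem.Chars.split₀ (t.filter pvPred) =
        (let st := t.foldl pvStepB ([], []);
         if st.2.isEmpty then st.1 else st.1 ++ [st.2]) := by
      unfold PySem.Chars.split₀
      rw [hgo, hfold]
    rw [hfilter, hsplit]
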